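-- pv_equiv track=rewrite | github.com/bjmorgan/clustering | md_clusters/composition.py | _hill_formula
-- ===== SOURCE A (Python) =====
-- from collections import Counter
--
-- def _hill_formula(counts: Counter[str]) -> str:
--     """Format element counts as a hill-system formula string.
--
--     Hill order: C first, then H, then remaining elements alphabetically.
--     Counts of 1 are omitted (e.g. ``"CH4"`` not ``"C1H4"``).
--     """
--     parts: list[str] = []
--
--     def _append(symbol: str) -> None:
--         n = counts[symbol]
--         parts.append(symbol if n == 1 else f"{symbol}{n}")
--
--     # Carbon first, then hydrogen.
--     if "C" in counts:
--         _append("C")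
--     if "H" in counts:
--         _append("H")
--
--     # Remaining elements alphabetically.
--     for symbol in sorted(counts):
--         if symbol not in ("C", "H"):
--             _append(symbol)
--
--     return "".join(parts)
-- ===== SOURCE B (Python) =====
-- from collections import Counter
--
-- def _hill_formula(counts: Counter[str]) -> str:
--     """Hill formula by selection: repeatedly extract the Hill-minimal symbol
--     (C first, then H, then alphabetical) from the set of remaining symbols,
--     appending its formatted piece to a string accumulator as we go.
--     No sort, no parts list, no C/H special-case branches."""
--     def _key(symbol: str) -> str:
--         if symbol == "C":
--             return "0"
--         if symbol == "H":
--             return "1"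
--         return "2" + symbol
--
--     remaining = set(counts)
--     out = ""
--     while remaining:
--         symbol = min(remaining, key=_key)
--         remaining.discard(symbol)
--         n = counts[symbol]
--         out += symbol if n == 1 else f"{symbol}{n}"
--     return out
-- ===== Notes on version B (the rewrite author's own statement) =====
-- stated objective: alternative
-- what changed: A appends C and H via special-case branches, then sorts all symbols and loops over them filtering C/H out, joining a parts list; B never sorts or builds a parts list: it runs a selection loop that repeatedly extracts the Hill-minimal symbol from a shrinking set (min under an injective rank key) and concatenates its formatted piece onto a string accumulator.
import Mathlib
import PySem

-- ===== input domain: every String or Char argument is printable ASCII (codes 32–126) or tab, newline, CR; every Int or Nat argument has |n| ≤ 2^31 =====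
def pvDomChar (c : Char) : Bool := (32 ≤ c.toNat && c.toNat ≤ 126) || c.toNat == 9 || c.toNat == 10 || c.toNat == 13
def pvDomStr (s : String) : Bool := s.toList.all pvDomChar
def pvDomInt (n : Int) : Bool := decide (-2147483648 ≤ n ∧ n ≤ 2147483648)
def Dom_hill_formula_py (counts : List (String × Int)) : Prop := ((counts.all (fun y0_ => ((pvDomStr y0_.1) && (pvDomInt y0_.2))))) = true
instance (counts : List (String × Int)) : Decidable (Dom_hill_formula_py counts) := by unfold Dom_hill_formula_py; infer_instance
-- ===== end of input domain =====

-- B replaces A's C/H branches + sort + filtered join by a selection loop: repeatedly extract the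
-- Hill-minimal remaining symbol from a set and append its formatted piece; return values proved equal.

-- ===== PORT A =====
def hill_formula_py (counts : List (String × Int)) : String :=
  let d := PySem.Dict.ofList counts
  -- nested helper _append(symbol)
  let app : List String → String → List String := fun parts symbol =>
    let n := d.getD symbol 0
    parts ++ [if n == 1 then symbol else symbol ++ PySem.Int.toStr n]
  let parts : List String := []
  let parts := if d.contains "C" then app parts "C" else parts
  let parts := if d.contains "H" then app parts "H" else parts
  let parts := (PySem.List.sorted d.keys (fun s => s) false).foldl
    (fun ps symbol => if !(symbol == "C" || symbol == "H") then app ps symbol else ps) parts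
  PySem.Str.join "" parts

-- ===== PORT B =====
-- Source B's _key
def hillKey (symbol : String) : String :=
  if symbol == "C" then "0" else if symbol == "H" then "1" else "2" ++ symbol

-- Source B's while-loop: fuel = |remaining| bounds the iterations (each one removes an element)
def hillLoop (counts : PySem.Dict String Int) : Nat → PySem.Set String → String → String
  | 0, _, out => out
  | fuel+1, remaining, out =>
    match PySem.List.min? remaining hillKey with
    | none => out                                   -- 'while remaining' exits on the empty set
    | some symbol =>
        let n := counts.getD symbol 0
        hillLoop counts fuel (PySem.Set.discard remaining symbol)
          (out ++ (if n == 1 then symbol else symbol ++ PySem.Int.toStr n))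

def hill_formula_py_alt (counts : List (String × Int)) : String :=
  let d := PySem.Dict.ofList counts
  let remaining : PySem.Set String := PySem.Set.ofList d.keys
  hillLoop d remaining.length remaining ""

-- ===== PRECONDITION & SPEC =====
def Spec_hill_formula_py (counts : List (String × Int)) (out : String) : Prop := out = hill_formula_py_alt counts
instance (counts : List (String × Int)) (out : String) : Decidable (Spec_hill_formula_py counts out) := by unfold Spec_hill_formula_py; infer_instance

-- ===== CLAIM (what is proved, stated in full; the proofs are below) =====
def Claim_equal_hill_formula_py : Prop := ∀ (counts : List (String × Int)), Dom_hill_formula_py counts → Spec_hill_formula_py counts (hill_formula_py counts)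

-- ===== LEMMAS AND PROOFS =====

-- the formatted piece for one symbol (shared shape of both programs' f-string)
def hillPiece (d : PySem.Dict String Int) (symbol : String) : String :=
  let n := d.getD symbol 0
  if n == 1 then symbol else symbol ++ PySem.Int.toStr n

theorem toList_two_append (s : String) : ("2" ++ s).toList = '2' :: s.toList := by
  rw [String.toList_append]; rfl

theorem hillKey_inj : Function.Injective hillKey := by
  intro a b h
  have h' := congrArg String.toList h
  unfold hillKey at h'
  split_ifs at h' <;> simp_all
  exact String.toList_inj.mp h'

theorem hillZeroOne : ("0" : String) < "1" := by
  rw [String.lt_iff_toList_lt]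
  exact List.lex_eq_true_iff_lt.mp rfl

theorem hillZeroTwo (s : String) : ("0" : String) < "2" ++ s := by
  rw [String.lt_iff_toList_lt, toList_two_append]
  exact List.lex_eq_true_iff_lt.mp rfl

theorem hillOneTwo (s : String) : ("1" : String) < "2" ++ s := by
  rw [String.lt_iff_toList_lt, toList_two_append]
  exact List.lex_eq_true_iff_lt.mp rfl

theorem hillTwoMono (a b : String) (h : a < b) : "2" ++ a < "2" ++ b := by
  rw [String.lt_iff_toList_lt, toList_two_append, toList_two_append]
  rw [String.lt_iff_toList_lt] at h
  exact List.cons_lt_cons_self.mpr h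

theorem hillKey_of_ne (s : String) (h1 : s ≠ "C") (h2 : s ≠ "H") : hillKey s = "2" ++ s := by
  simp [hillKey, h1, h2]

-- the Hill-key sort is: C (if present), then H (if present), then the alphabetical sort filtered
theorem hill_sorted (ks : List String) (hnd : ks.Nodup) :
    PySem.List.sorted ks hillKey false =
      ((if "C" ∈ ks then ["C"] else []) ++ (if "H" ∈ ks then ["H"] else [])) ++
      (PySem.List.sorted ks (fun s => s) false).filter (fun s => !(s == "C" || s == "H")) := by
  set S := PySem.List.sorted ks (fun s => s) false with hSdef
  have hS : S.Perm ks := PySem.List.sorted_perm ks (fun s => s) false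
  have hndS : S.Nodup := (hS.nodup_iff).mpr hnd
  apply PySem.List.sorted_eq_of_perm_of_pairwise_lt
  · -- the permutation
    have hfq : (S.filter (fun s => (s == "C" || s == "H"))).Perm
        ((if "C" ∈ ks then ["C"] else []) ++ (if "H" ∈ ks then ["H"] else [])) := by
      rw [List.perm_ext_iff_of_nodup (hndS.filter _)]
      · intro a
        simp only [List.mem_filter, hS.mem_iff, List.mem_append]
        constructor
        · rintro ⟨ha, hq⟩
          simp only [Bool.or_eq_true, beq_iff_eq] at hq
          rcases hq with rfl | rfl
          · left; simp [ha]
          · right; simp [ha]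
        · intro h
          rcases h with h | h <;> split_ifs at h with hm <;> simp at h <;> subst h <;> simp [hm]
      · split_ifs <;> simp
    have h1 : ((if "C" ∈ ks then ["C"] else []) ++ (if "H" ∈ ks then ["H"] else []) ++
        S.filter (fun s => !(s == "C" || s == "H"))).Perm
        (S.filter (fun s => (s == "C" || s == "H")) ++
         S.filter (fun s => !(s == "C" || s == "H"))) :=
      (hfq.symm).append_right _
    exact h1.trans ((List.filter_append_perm _ S).trans hS)
  · -- strict pairwise increase of the key
    have hle : S.Pairwise (fun a b => a ≤ b) := PySem.List.sorted_pairwise ks (fun s => s)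
    have hlt : S.Pairwise (fun a b => a < b) := by
      have := hle.and hndS
      exact this.imp (fun h => lt_of_le_of_ne h.1 h.2)
    have hF : (S.filter (fun s => !(s == "C" || s == "H"))).Pairwise
        (fun a b => hillKey a < hillKey b) := by
      rw [List.pairwise_filter]
      refine hlt.imp_of_mem ?_
      intro a b _ _ hab hpa hpb
      simp only [Bool.not_eq_eq_eq_not, Bool.not_true, Bool.or_eq_false_iff, beq_eq_false_iff_ne,
        ne_eq] at hpa hpb
      rw [hillKey_of_ne a hpa.1 hpa.2, hillKey_of_ne b hpb.1 hpb.2]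
      exact hillTwoMono a b hab
    rw [List.pairwise_append]
    refine ⟨?_, hF, ?_⟩
    · rw [List.pairwise_append]
      refine ⟨by split_ifs <;> simp, by split_ifs <;> simp, ?_⟩
      intro a ha b hb
      split_ifs at ha hb <;> simp at ha hb
      subst ha; subst hb
      exact hillZeroOne
    · intro a ha b hb
      simp only [List.mem_filter] at hb
      have hbne : b ≠ "C" ∧ b ≠ "H" := by
        have := hb.2
        simp only [Bool.not_eq_eq_eq_not, Bool.not_true, Bool.or_eq_false_iff,
          beq_eq_false_iff_ne, ne_eq] at this
        exact this
      rw [hillKey_of_ne b hbne.1 hbne.2]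
      rcases List.mem_append.mp ha with h | h <;> split_ifs at h <;> simp at h <;> subst h
      · exact hillZeroTwo b
      · exact hillOneTwo b

theorem join_empty_cons (p : List Char) (rest : List (List Char)) :
    PySem.Chars.join [] (p :: rest) = p ++ PySem.Chars.join [] rest := by
  induction rest generalizing p with
  | nil => simp [PySem.Chars.join, List.intercalate]
  | cons q t ih => simp [PySem.Chars.join, List.intercalate, List.intersperse] at *

theorem str_join_empty_cons (p : String) (rest : List String) :
    PySem.Str.join "" (p :: rest) = p ++ PySem.Str.join "" rest := by
  apply String.toList_inj.mp
  simp [PySem.Str.join, join_empty_cons, pysem]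

-- the min of the loop is the head of the hillKey-sorted order
theorem min_head_sorted (r : List String) (m : String) (t : List String)
    (h : PySem.List.sorted r hillKey false = m :: t) :
    PySem.List.min? r hillKey = some m := by
  have hmem : m ∈ r := by
    have : m ∈ PySem.List.sorted r hillKey false := by rw [h]; exact List.mem_cons_self
    rwa [PySem.List.mem_sorted] at this
  have hne : r ≠ [] := by
    intro hr; subst hr
    rw [show PySem.List.sorted ([] : List String) hillKey false = [] from rfl] at h
    simp at h
  obtain ⟨m', hm'⟩ : ∃ m', PySem.List.min? r hillKey = some m' := by
    cases hmin : PySem.List.min? r hillKey with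
    | none => exact absurd ((PySem.List.min?_eq_none_iff r hillKey).mp hmin) hne
    | some x => exact ⟨x, rfl⟩
  have h1 : hillKey m' ≤ hillKey m := PySem.List.min?_isMin hm' m hmem
  have h2 : hillKey m ≤ hillKey m' :=
    PySem.List.key_head_sorted_le r hillKey h m' (PySem.List.min?_mem hm')
  rw [hm', hillKey_inj (le_antisymm h1 h2)]

theorem hillLoop_spec (d : PySem.Dict String Int) (ms : List String) :
    ∀ (fuel : Nat) (r : PySem.Set String) (out : String), r.Nodup → ms.length ≤ fuel →
    PySem.List.sorted r hillKey false = ms →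
    hillLoop d fuel r out = out ++ PySem.Str.join "" (ms.map (hillPiece d)) := by
  induction ms with
  | nil =>
    intro fuel r out hnd _ hs
    have hr : r = [] := (PySem.List.sorted_eq_nil_iff r hillKey false).mp hs
    subst hr
    cases fuel <;>
      simp [hillLoop,
        show PySem.List.min? ([] : List String) hillKey = none from
          (PySem.List.min?_eq_none_iff _ _).mpr rfl,
        show PySem.Str.join "" ([] : List String) = "" from rfl, String.append_empty]
  | cons m ms ih =>
    intro fuel r out hnd hfuel hs
    obtain ⟨k, rfl⟩ : ∃ k, fuel = k + 1 := by
      cases fuel with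
      | zero => rw [List.length_cons] at hfuel; omega
      | succ k => exact ⟨k, rfl⟩
    have hperm : (m :: ms).Perm r := by rw [← hs]; exact PySem.List.sorted_perm r hillKey false
    have hndm : (m :: ms).Nodup := hperm.nodup_iff.mpr hnd
    have hmin : PySem.List.min? r hillKey = some m := min_head_sorted r m ms hs
    have hple : (m :: ms).Pairwise (fun a b => hillKey a ≤ hillKey b) := by
      rw [← hs]; exact PySem.List.sorted_pairwise r hillKey
    have hplt : ms.Pairwise (fun a b => hillKey a < hillKey b) := by
      have := (hple.and hndm).sublist (List.sublist_cons_self m ms)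
      exact this.imp (fun h => lt_of_le_of_ne h.1 (fun he => h.2 (hillKey_inj he)))
    -- the removed set sorts to the tail
    have hdisc : PySem.List.sorted (PySem.Set.discard r m) hillKey false = ms := by
      apply PySem.List.sorted_eq_of_perm_of_pairwise_lt _ _ hillKey _ hplt
      rw [List.perm_ext_iff_of_nodup hndm.of_cons (PySem.Set.nodup_discard r m hnd)]
      intro a
      simp only [PySem.Set.mem_discard, ← hperm.mem_iff, List.mem_cons]
      have hmnotin : m ∉ ms := (List.nodup_cons.mp hndm).1
      constructor
      · intro ha; exact ⟨Or.inr ha, fun he => hmnotin (he ▸ ha)⟩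
      · rintro ⟨ha | ha, hne⟩
        · exact absurd ha hne
        · exact ha
    have hlen : ms.length ≤ k := by
      have h := hfuel
      rw [List.length_cons] at h
      omega
    simp only [hillLoop, hmin]
    rw [ih k _ _ (PySem.Set.nodup_discard r m hnd) hlen hdisc]
    rw [List.map_cons, str_join_empty_cons, ← String.append_assoc]
    rfl

-- ===== VERDICT (by name: the statement is the Claim_ definition above) =====
theorem hill_formula_py_spec : Claim_equal_hill_formula_py := by
  intro counts _
  unfold Spec_hill_formula_py hill_formula_py hill_formula_py_alt
  dsimp only
  have hnd : (PySem.Dict.ofList counts).keys.Nodup := PySem.Dict.nodup_keys_ofList counts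
  rw [PySem.Set.ofList_eq_self_of_nodup _ hnd]
  rw [hillLoop_spec (PySem.Dict.ofList counts)
        (PySem.List.sorted (PySem.Dict.ofList counts).keys hillKey false)
        ((PySem.Dict.ofList counts).keys.length) (PySem.Dict.ofList counts).keys "" hnd
        (le_of_eq (PySem.List.length_sorted _ _ _)) rfl]
  rw [PySem.List.foldl_append_if]
  rw [hill_sorted (PySem.Dict.ofList counts).keys hnd]
  by_cases hC : "C" ∈ (PySem.Dict.ofList counts).keys <;>
    by_cases hH : "H" ∈ (PySem.Dict.ofList counts).keys <;>
    simp [hC, hH, PySem.Dict.contains_eq_decide_mem_keys, hillPiece, str_join_empty_cons,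
      String.empty_append] <;>
    (congr 1; apply List.map_congr_left; intro x _; simp [hillPiece])
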